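-- pv_equiv track=rewrite | github.com/miny-genie/BOJ | acmicpc_17471.py | solve_gerrymandering
-- ===== SOURCE A (Python) =====
-- from collections import deque
-- from itertools import combinations
--
-- def solve_gerrymandering(N: int, population: list, graph: dict) -> int:
--     def is_connected(group: set, graph: dict) -> bool:
--         start = next(iter(group))    # Random Start Point
--         visited = set([start])
--         queue = deque([start])
--         while queue:
--             node = queue.popleft()
--             for neighbor in graph[node]:
--                 if neighbor not in visited and neighbor in group:
--                     visited.add(neighbor)
--                     queue.append(neighbor)
--         return visited == group
--
--     def calculate_difference(group1: set, group2: set, population: list) -> int: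
--         pop1 = sum(population[i - 1] for i in group1)
--         pop2 = sum(population[i - 1] for i in group2)
--         return abs(pop1 - pop2)
--
--     nodes = list(range(1, N+1))
--     min_difference = float('inf')
--
--     for i in range(1, N // 2 + 1):
--         for group1 in combinations(nodes, i):
--             group1 = set(group1)
--             group2 = set(nodes) - group1
--
--             if is_connected(group1, graph) and is_connected(group2, graph):
--                 difference = calculate_difference(group1, group2, population)
--                 min_difference = min(min_difference, difference)
--
--     return min_difference if min_difference != float('inf') else -1
-- ===== SOURCE B (Python) =====
-- def solve_gerrymandering(N: int, population: list, graph: dict) -> int: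
--     def connected(group):  # quick-find union-find over the group's nodes
--         comp = {v: v for v in group}
--         for u in group:
--             for v in graph[u]:
--                 if v in comp and comp[u] != comp[v]:
--                     cu = comp[u]
--                     cv = comp[v]
--                     for w in group:
--                         if comp[w] == cu:
--                             comp[w] = cv
--         c0 = comp[group[0]]
--         return all(comp[v] == c0 for v in group)
--
--     if N < 2:
--         return -1
--     total = sum(population[:N])
--     subsets = [[]]
--     for v in range(2, N + 1):
--         subsets = subsets + [s + [v] for s in subsets]
--     best = None
--     for s in subsets:
--         if len(s) == N - 1:
--             continue  # complement of {1} | s would be empty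
--         g1 = [1] + s
--         g2 = [v for v in range(2, N + 1) if v not in s]
--         if connected(g1) and connected(g2):
--             d = abs(total - 2 * sum(population[v - 1] for v in g1))
--             if best is None or d < best:
--                 best = d
--     return -1 if best is None else best
-- ===== Notes on version B (the rewrite author's own statement) =====
-- stated objective: alternative
-- what changed: B tests connectivity with a quick-find union-find (a node-to-class-label dict merged eagerly per edge) instead of A's BFS with queue+visited set, and enumerates each 2-partition exactly once as {1}+s over an iteratively doubled powerset of {2..N} with the difference computed as abs(total - 2*pop(side1)) from one precomputed total, instead of A's combinations of every size 1..N//2 with both-side sums.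
-- outside the precondition, e.g. on solve_gerrymandering(4, [2, 6, 0, 1], {1: [3], 2: [3, 4], 3: [2], 4: [1]}): A returns 5, B returns 3; on solve_gerrymandering(3, [1], {1: [], 2: [], 3: []}): A returns -1, B returns -1
import Mathlib
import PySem

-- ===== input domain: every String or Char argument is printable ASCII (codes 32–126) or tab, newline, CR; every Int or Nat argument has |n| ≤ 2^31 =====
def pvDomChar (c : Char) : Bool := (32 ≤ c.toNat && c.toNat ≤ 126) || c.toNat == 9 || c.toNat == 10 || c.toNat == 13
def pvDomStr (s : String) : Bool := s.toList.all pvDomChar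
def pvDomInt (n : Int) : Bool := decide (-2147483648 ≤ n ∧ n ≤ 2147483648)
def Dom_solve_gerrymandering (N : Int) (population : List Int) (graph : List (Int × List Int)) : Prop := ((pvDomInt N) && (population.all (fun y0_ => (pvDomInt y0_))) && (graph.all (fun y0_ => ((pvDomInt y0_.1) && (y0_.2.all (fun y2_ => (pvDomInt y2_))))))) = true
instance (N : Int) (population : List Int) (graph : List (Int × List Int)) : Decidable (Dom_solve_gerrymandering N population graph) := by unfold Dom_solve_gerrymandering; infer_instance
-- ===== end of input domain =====

-- B tests connectivity with a quick-find union-find (node→class-label dict, classes merged per edge)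
-- instead of A's BFS, and enumerates each partition once via a powerset of {2..N} with |total - 2*pop(side1)|
-- instead of A's combinations by size; same cost (objective: alternative).


-- ===== PORT A =====
-- graph[node] (KeyError excluded by Pre_)
def pvAdj (graph : List (Int × List Int)) (v : Int) : List Int :=
  PySem.Dict.getD (PySem.Dict.mk graph) v []

-- one BFS dequeue step: scan the neighbours, extending (queue, visited)
def pvBfsStep (graph : List (Int × List Int)) (group : List Int) (node : Int)
    (qs vis : List Int) : List Int × List Int :=
  (pvAdj graph node).foldl (fun p nb =>
    if !(p.2.contains nb) && group.contains nb then (p.1 ++ [nb], p.2 ++ [nb]) else p) (qs, vis)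

-- the while-queue loop; fuel group.length bounds the number of dequeues (each enqueue is a new group member)
def pvBfs (graph : List (Int × List Int)) (group : List Int) :
    Nat → List Int → List Int → List Int
  | 0, _, vis => vis
  | _ + 1, [], vis => vis
  | fuel + 1, node :: qs, vis =>
    let p := pvBfsStep graph group node qs vis
    pvBfs graph group fuel p.1 p.2

-- A's is_connected: BFS from the group's minimal node; 'visited == group' as mutual containment
def pvIsConnected (group : List Int) (graph : List (Int × List Int)) : Bool :=
  match group with
  | [] => true
  | g :: _ =>
    let vis := pvBfs graph group group.length [g] [g]
    group.all (fun v => vis.contains v) && vis.all (fun v => group.contains v)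

def solve_gerrymandering (N : Int) (population : List Int) (graph : List (Int × List Int)) : Int :=
  let nodes := PySem.List.pyRange 1 (N + 1) 1
  let best := (PySem.List.pyRange 1 (PySem.Int.floordiv N 2 + 1) 1).foldl (fun acc i =>
    (PySem.List.combinations nodes i.toNat).foldl (fun acc g1 =>
      let g2 := nodes.filter (fun v => !(g1.contains v))
      if pvIsConnected g1 graph && pvIsConnected g2 graph then
        let d := |(g1.map (fun v => PySem.List.pyGetD population (v - 1) 0)).sum
                 - (g2.map (fun v => PySem.List.pyGetD population (v - 1) 0)).sum|
        match acc with
        | none => some d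
        | some m => some (min m d)
      else acc) acc) (none : Option Int)
  match best with
  | some d => d
  | none => -1

-- ===== PORT B =====
-- B's connected(): quick-find union-find; 'for w in group: if comp[w]==cu: comp[w]=cv'
def pvRelabel (group : List Int) (comp : PySem.Dict Int Int) (cu cv : Int) : PySem.Dict Int Int :=
  group.foldl (fun c w => if PySem.Dict.getD c w 0 == cu then PySem.Dict.insert c w cv else c) comp

-- 'if v in comp and comp[u] != comp[v]: relabel class of u to class of v'
def pvUFStep (group : List Int) (comp : PySem.Dict Int Int) (u v : Int) : PySem.Dict Int Int :=
  if (PySem.Dict.get? comp v).isSome &&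
     !(PySem.Dict.getD comp u 0 == PySem.Dict.getD comp v 0) then
    pvRelabel group comp (PySem.Dict.getD comp u 0) (PySem.Dict.getD comp v 0)
  else comp

def pvIsConnectedUF (group : List Int) (graph : List (Int × List Int)) : Bool :=
  match group with
  | [] => true
  | g0 :: _ =>
    let comp := group.foldl
      (fun c u => (pvAdj graph u).foldl (fun c v => pvUFStep group c u v) c)
      (PySem.Dict.mk (group.map (fun v => (v, v))))
    let c0 := PySem.Dict.getD comp g0 0
    group.all (fun v => PySem.Dict.getD comp v 0 == c0)

def solve_gerrymandering_alt (N : Int) (population : List Int) (graph : List (Int × List Int)) : Int :=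
  if N < 2 then -1 else
  let total := (PySem.List.slice population none (some N)).sum
  let r := PySem.List.pyRange 2 (N + 1) 1
  let subsets := r.foldl (fun acc v => acc ++ acc.map (fun s => s ++ [v])) [[]]
  let best := subsets.foldl (fun best s =>
    if s.length = (N - 1).toNat then best
    else
      let g1 := 1 :: s
      let g2 := r.filter (fun v => !(s.contains v))
      if pvIsConnectedUF g1 graph && pvIsConnectedUF g2 graph then
        let d := |total - 2 * (g1.map (fun v => PySem.List.pyGetD population (v - 1) 0)).sum|
        match best with
        | none => some d
        | some m => if d < m then some d else some m
      else best) (none : Option Int)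
  match best with
  | none => -1
  | some d => d

-- ===== PRECONDITION & SPEC =====
-- Pre_ excludes inputs on which A raises (a node 1..N missing from graph: KeyError; population shorter
-- than N while some tested partition is connected: IndexError — required conservatively whenever N ≥ 2),
-- and excludes asymmetric adjacency among 1..N, where A's answer depends on which element of a Python set
-- next(iter(...)) happens to yield (an accident of set iteration order), so no fixed traversal can match it.
def Pre_solve_gerrymandering (N : Int) (population : List Int) (graph : List (Int × List Int)) : Prop :=
  N < 2 ∨ (N ≤ (population.length : Int)
    ∧ (∀ v ∈ PySem.List.pyRange 1 (N + 1) 1, (PySem.Dict.get? (PySem.Dict.mk graph) v).isSome)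
    ∧ (∀ u ∈ PySem.List.pyRange 1 (N + 1) 1, ∀ v ∈ PySem.List.pyRange 1 (N + 1) 1,
        (v ∈ pvAdj graph u ↔ u ∈ pvAdj graph v)))
instance (N : Int) (population : List Int) (graph : List (Int × List Int)) : Decidable (Pre_solve_gerrymandering N population graph) := by unfold Pre_solve_gerrymandering; infer_instance

def pvWitness_solve_gerrymandering : Int × List Int × (List (Int × List Int)) :=
  (2, [3, 5], [(1, [2]), (2, [1])])

def Spec_solve_gerrymandering (N : Int) (population : List Int) (graph : List (Int × List Int)) (out : Int) : Prop := out = solve_gerrymandering_alt N population graph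
instance (N : Int) (population : List Int) (graph : List (Int × List Int)) (out : Int) : Decidable (Spec_solve_gerrymandering N population graph out) := by unfold Spec_solve_gerrymandering; infer_instance

-- ===== CLAIM (what is proved, stated in full; the proofs are below) =====
def Claim_equal_solve_gerrymandering : Prop := ∀ (N : Int) (population : List Int) (graph : List (Int × List Int)), Dom_solve_gerrymandering N population graph → Pre_solve_gerrymandering N population graph → Spec_solve_gerrymandering N population graph (solve_gerrymandering N population graph)

-- ===== LEMMAS AND PROOFS =====

-- ----- connectivity: both tests decide reachability of every group node from the head -----

-- an edge of the subgraph induced on the group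
def pvEdge (graph : List (Int × List Int)) (g : List Int) (u v : Int) : Prop :=
  u ∈ g ∧ v ∈ g ∧ v ∈ pvAdj graph u

-- the symmetric relation generated by a list of (already processed) edges, and its reachability
def pvRel (el : List (Int × Int)) (a b : Int) : Prop := (a, b) ∈ el ∨ (b, a) ∈ el

def pvReach (el : List (Int × Int)) (a b : Int) : Prop := Relation.ReflTransGen (pvRel el) a b

lemma pvReach_symm (el : List (Int × Int)) {a b : Int} (h : pvReach el a b) : pvReach el b a :=
  Relation.ReflTransGen.symmetric (fun _ _ hxy => hxy.symm) h

lemma pvReach_mono {el1 el2 : List (Int × Int)} (h : ∀ p : Int × Int, p ∈ el1 → p ∈ el2)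
    {a b : Int} : pvReach el1 a b → pvReach el2 a b :=
  Relation.ReflTransGen.mono (fun _ _ hxy => hxy.imp (h _) (h _))

lemma pvReach_congr {el1 el2 : List (Int × Int)} (h : ∀ p : Int × Int, p ∈ el1 ↔ p ∈ el2)
    (a b : Int) : pvReach el1 a b ↔ pvReach el2 a b :=
  ⟨pvReach_mono (fun p hp => (h p).1 hp), pvReach_mono (fun p hp => (h p).2 hp)⟩

lemma pvReach_nil {a b : Int} : pvReach [] a b ↔ a = b := by
  constructor
  · intro h
    induction h with
    | refl => rfl
    | tail _ hstep ih => rcases hstep with h | h <;> simp at h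
  · rintro rfl; exact Relation.ReflTransGen.refl

lemma pvReach_cons {u v : Int} {done : List (Int × Int)} {a b : Int} :
    pvReach ((u, v) :: done) a b ↔
      pvReach done a b ∨ (pvReach done a u ∧ pvReach done v b) ∨
        (pvReach done a v ∧ pvReach done u b) := by
  constructor
  · intro h
    induction h with
    | refl => exact Or.inl Relation.ReflTransGen.refl
    | @tail c d hac hstep ih =>
      have hcd : pvRel done c d ∨ (c = u ∧ d = v) ∨ (c = v ∧ d = u) := by
        rcases hstep with h | h
        · rcases List.mem_cons.1 h with h | h
          · exact Or.inr (Or.inl ⟨congrArg Prod.fst h, congrArg Prod.snd h⟩)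
          · exact Or.inl (Or.inl h)
        · rcases List.mem_cons.1 h with h | h
          · exact Or.inr (Or.inr ⟨congrArg Prod.snd h, congrArg Prod.fst h⟩)
          · exact Or.inl (Or.inr h)
      rcases ih with hac' | ⟨hau, hvc⟩ | ⟨hav, huc⟩
      · rcases hcd with hr | ⟨rfl, rfl⟩ | ⟨rfl, rfl⟩
        · exact Or.inl (hac'.tail hr)
        · exact Or.inr (Or.inl ⟨hac', Relation.ReflTransGen.refl⟩)
        · exact Or.inr (Or.inr ⟨hac', Relation.ReflTransGen.refl⟩)
      · rcases hcd with hr | ⟨rfl, rfl⟩ | ⟨rfl, rfl⟩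
        · exact Or.inr (Or.inl ⟨hau, hvc.tail hr⟩)
        · exact Or.inr (Or.inl ⟨hau, Relation.ReflTransGen.refl⟩)
        · exact Or.inl hau
      · rcases hcd with hr | ⟨rfl, rfl⟩ | ⟨rfl, rfl⟩
        · exact Or.inr (Or.inr ⟨hav, huc.tail hr⟩)
        · exact Or.inl hav
        · exact Or.inr (Or.inr ⟨hav, Relation.ReflTransGen.refl⟩)
  · have hsub : ∀ x y : Int, pvReach done x y → pvReach ((u, v) :: done) x y :=
      fun x y => pvReach_mono (fun p hp => List.mem_cons_of_mem _ hp)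
    have huv : pvReach ((u, v) :: done) u v :=
      Relation.ReflTransGen.single (Or.inl (List.mem_cons_self ..))
    rintro (h | ⟨h1, h2⟩ | ⟨h1, h2⟩)
    · exact hsub _ _ h
    · exact (hsub _ _ h1).trans (huv.trans (hsub _ _ h2))
    · exact (hsub _ _ h1).trans ((pvReach_symm _ huv).trans (hsub _ _ h2))

lemma pvReach_cons_redundant {u v : Int} {done : List (Int × Int)}
    (huv : pvReach done u v) (a b : Int) :
    pvReach ((u, v) :: done) a b ↔ pvReach done a b := by
  rw [pvReach_cons]
  constructor
  · rintro (h | ⟨h1, h2⟩ | ⟨h1, h2⟩)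
    · exact h
    · exact h1.trans (huv.trans h2)
    · exact h1.trans ((pvReach_symm _ huv).trans h2)
  · exact Or.inl

-- the initial dict {v: v for v in group}
lemma pvGet?_mk_id (l : List Int) (x : Int) :
    PySem.Dict.get? (PySem.Dict.mk (l.map (fun v => (v, v)))) x
      = if x ∈ l then some x else none := by
  induction l with
  | nil => simp [PySem.Dict.get?]
  | cons w t ih =>
    simp only [List.map_cons, PySem.Dict.get?_mk_cons, ih]
    by_cases hw : w = x
    · subst hw; simp
    · simp [hw, Ne.symm hw]

-- relabelling: keys unchanged, values follow the cu→cv rewrite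
lemma pvRelabel_keys (g : List Int) (c : PySem.Dict Int Int) (cu cv : Int) (S : Int → Prop)
    (hg : ∀ w ∈ g, S w) (hkeys : ∀ x, (PySem.Dict.get? c x).isSome ↔ S x) :
    ∀ x, (PySem.Dict.get? (pvRelabel g c cu cv) x).isSome ↔ S x := by
  induction g generalizing c with
  | nil => exact hkeys
  | cons w t ih =>
    show ∀ x, (PySem.Dict.get? (pvRelabel t (if PySem.Dict.getD c w 0 == cu then PySem.Dict.insert c w cv else c) cu cv) x).isSome ↔ S x
    refine ih _ (fun y hy => hg y (List.mem_cons_of_mem _ hy)) (fun x => ?_)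
    split
    · rw [PySem.Dict.get?_insert]
      by_cases hx : x = w
      · subst hx; simpa using hg x (List.mem_cons_self ..)
      · simp [hx, hkeys]
    · exact hkeys x

lemma pvRelabel_getD (g : List Int) (hg : g.Nodup) (c : PySem.Dict Int Int) (cu cv x : Int) :
    PySem.Dict.getD (pvRelabel g c cu cv) x 0 =
      if x ∈ g ∧ PySem.Dict.getD c x 0 = cu then cv else PySem.Dict.getD c x 0 := by
  induction g generalizing c with
  | nil => simp [pvRelabel]
  | cons w t ih =>
    rcases List.nodup_cons.1 hg with ⟨hw, ht⟩
    have hfold : pvRelabel (w :: t) c cu cv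
        = pvRelabel t (if PySem.Dict.getD c w 0 == cu then PySem.Dict.insert c w cv else c) cu cv := rfl
    rw [hfold]
    by_cases hwc : PySem.Dict.getD c w 0 = cu
    · rw [if_pos (by simpa using hwc), ih ht]
      by_cases hx : x = w
      · subst hx
        rw [PySem.Dict.getD_insert]
        simp [hw, hwc]
      · rw [PySem.Dict.getD_insert]
        simp [hx, List.mem_cons]
    · rw [if_neg (by simpa using hwc), ih ht]
      by_cases hx : x = w
      · subst hx
        simp [hw, hwc]
      · simp [hx, List.mem_cons]

lemma pvIfEq (A B cu cv : Int) (hne : cu ≠ cv) :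
    ((if A = cu then cv else A) = (if B = cu then cv else B)) ↔
      (A = B ∨ (A = cu ∧ cv = B) ∨ (A = cv ∧ cu = B)) := by
  split_ifs with h1 h2 <;> constructor <;> intro h <;> subst_vars <;> tauto

-- processing one candidate edge preserves the union-find invariant
lemma pvUFStep_inv (g : List Int) (hg : g.Nodup) (u v : Int) (hu : u ∈ g)
    (c : PySem.Dict Int Int) (done : List (Int × Int))
    (hkeys : ∀ x, (PySem.Dict.get? c x).isSome ↔ x ∈ g)
    (hiff : ∀ a ∈ g, ∀ b ∈ g,
      (PySem.Dict.getD c a 0 = PySem.Dict.getD c b 0 ↔ pvReach done a b)) :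
    (∀ x, (PySem.Dict.get? (pvUFStep g c u v) x).isSome ↔ x ∈ g) ∧
    (∀ a ∈ g, ∀ b ∈ g,
      (PySem.Dict.getD (pvUFStep g c u v) a 0 = PySem.Dict.getD (pvUFStep g c u v) b 0 ↔
        pvReach (if v ∈ g then (u, v) :: done else done) a b)) := by
  by_cases hv : v ∈ g
  · have hvs : (PySem.Dict.get? c v).isSome = true := (hkeys v).2 hv
    by_cases heq : PySem.Dict.getD c u 0 = PySem.Dict.getD c v 0
    · have hcond : ((PySem.Dict.get? c v).isSome &&
          !(PySem.Dict.getD c u 0 == PySem.Dict.getD c v 0)) = false := by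
        simp [heq]
      unfold pvUFStep
      rw [hcond]
      simp only [Bool.false_eq_true, if_false, if_pos hv]
      refine ⟨hkeys, fun a ha b hb => ?_⟩
      rw [pvReach_cons_redundant ((hiff u hu v hv).1 heq)]
      exact hiff a ha b hb
    · have hcond : ((PySem.Dict.get? c v).isSome &&
          !(PySem.Dict.getD c u 0 == PySem.Dict.getD c v 0)) = true := by
        simp [heq, hvs]
      unfold pvUFStep
      rw [hcond]
      simp only [if_true, if_pos hv]
      refine ⟨pvRelabel_keys g c _ _ _ (fun w hw => hw) hkeys, fun a ha b hb => ?_⟩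
      rw [pvRelabel_getD g hg c _ _ a, pvRelabel_getD g hg c _ _ b, pvReach_cons]
      simp only [ha, hb, true_and]
      rw [pvIfEq _ _ _ _ heq]
      rw [(hiff a ha b hb).symm, (hiff a ha u hu).symm, (hiff v hv b hb).symm,
        (hiff a ha v hv).symm, (hiff u hu b hb).symm]
  · have hvs : (PySem.Dict.get? c v).isSome = false := by
      by_contra h
      exact hv ((hkeys v).1 (Bool.of_not_eq_false h))
    have hcond : ((PySem.Dict.get? c v).isSome &&
        !(PySem.Dict.getD c u 0 == PySem.Dict.getD c v 0)) = false := by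
      simp [hvs]
    unfold pvUFStep
    rw [hcond]
    simp only [Bool.false_eq_true, if_false, if_neg hv]
    exact ⟨hkeys, hiff⟩

-- the whole edge fold: class labels agree exactly on nodes connected by the processed edges
lemma pvUFFold_inv (g : List Int) (hg : g.Nodup) (el : List (Int × Int))
    (c : PySem.Dict Int Int) (done : List (Int × Int))
    (hel : ∀ e ∈ el, e.1 ∈ g)
    (hkeys : ∀ x, (PySem.Dict.get? c x).isSome ↔ x ∈ g)
    (hiff : ∀ a ∈ g, ∀ b ∈ g,
      (PySem.Dict.getD c a 0 = PySem.Dict.getD c b 0 ↔ pvReach done a b)) :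
    ∀ a ∈ g, ∀ b ∈ g,
      (PySem.Dict.getD (el.foldl (fun c e => pvUFStep g c e.1 e.2) c) a 0 =
       PySem.Dict.getD (el.foldl (fun c e => pvUFStep g c e.1 e.2) c) b 0 ↔
       pvReach (done ++ el.filter (fun e => decide (e.2 ∈ g))) a b) := by
  induction el generalizing c done with
  | nil => simpa using hiff
  | cons e el ih =>
    obtain ⟨hk1, hi1⟩ := pvUFStep_inv g hg e.1 e.2 (hel e (List.mem_cons_self ..)) c done hkeys hiff
    intro a ha b hb
    rw [List.foldl_cons]
    rw [ih (pvUFStep g c e.1 e.2) (if e.2 ∈ g then (e.1, e.2) :: done else done)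
      (fun x hx => hel x (List.mem_cons_of_mem _ hx)) hk1 hi1 a ha b hb]
    refine pvReach_congr (fun p => ?_) a b
    by_cases he : e.2 ∈ g
    · simp only [if_pos he, List.filter_cons, decide_eq_true he, if_true, List.mem_append,
        List.mem_cons]
      tauto
    · simp only [if_neg he, List.filter_cons, decide_eq_false he, Bool.false_eq_true, if_false,
        List.mem_append]

-- B's union-find test decides head-reachability
lemma pvIsConnectedUF_iff (graph : List (Int × List Int)) (g0 : Int) (rest : List Int)
    (hg : (g0 :: rest).Nodup)
    (hsym : ∀ u ∈ g0 :: rest, ∀ v ∈ g0 :: rest, (v ∈ pvAdj graph u ↔ u ∈ pvAdj graph v)) :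
    pvIsConnectedUF (g0 :: rest) graph = true ↔
      ∀ v ∈ g0 :: rest, Relation.ReflTransGen (pvEdge graph (g0 :: rest)) g0 v := by
  have hmem0 : g0 ∈ g0 :: rest := List.mem_cons_self ..
  have hkeys0 : ∀ x, (PySem.Dict.get? (PySem.Dict.mk ((g0 :: rest).map (fun v => (v, v)))) x).isSome
      ↔ x ∈ g0 :: rest := by
    intro x
    rw [pvGet?_mk_id]
    split <;> simp [*]
  have hgetD0 : ∀ a ∈ g0 :: rest,
      PySem.Dict.getD (PySem.Dict.mk ((g0 :: rest).map (fun v => (v, v)))) a 0 = a := by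
    intro a ha
    rw [PySem.Dict.getD_eq_get?_getD, pvGet?_mk_id, if_pos ha]
    rfl
  have hiff0 : ∀ a ∈ g0 :: rest, ∀ b ∈ g0 :: rest,
      (PySem.Dict.getD (PySem.Dict.mk ((g0 :: rest).map (fun v => (v, v)))) a 0 =
       PySem.Dict.getD (PySem.Dict.mk ((g0 :: rest).map (fun v => (v, v)))) b 0 ↔ pvReach [] a b) := by
    intro a ha b hb
    rw [hgetD0 a ha, hgetD0 b hb, pvReach_nil]
  have hfold : (g0 :: rest).foldl
        (fun c u => (pvAdj graph u).foldl (fun c v => pvUFStep (g0 :: rest) c u v) c)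
        (PySem.Dict.mk ((g0 :: rest).map (fun v => (v, v))))
      = ((g0 :: rest).flatMap (fun u => (pvAdj graph u).map (fun v => (u, v)))).foldl
          (fun c e => pvUFStep (g0 :: rest) c e.1 e.2)
          (PySem.Dict.mk ((g0 :: rest).map (fun v => (v, v)))) := by
    rw [List.foldl_flatMap]
    simp only [List.foldl_map]
  have hel : ∀ e ∈ (g0 :: rest).flatMap (fun u => (pvAdj graph u).map (fun v => (u, v))),
      e.1 ∈ g0 :: rest := by
    intro e he
    rcases List.mem_flatMap.1 he with ⟨u, hu, hm⟩
    rcases List.mem_map.1 hm with ⟨v, hv, rfl⟩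
    exact hu
  have hmain := pvUFFold_inv (g0 :: rest) hg _ _ [] hel hkeys0 hiff0
  have hmemEL : ∀ x y : Int,
      ((x, y) ∈ (((g0 :: rest).flatMap (fun u => (pvAdj graph u).map (fun v => (u, v)))).filter
        (fun e => decide (e.2 ∈ g0 :: rest)))) ↔
      (x ∈ g0 :: rest ∧ y ∈ g0 :: rest ∧ y ∈ pvAdj graph x) := by
    intro x y
    simp only [List.mem_filter, List.mem_flatMap, List.mem_map, Prod.mk.injEq,
      decide_eq_true_eq]
    constructor
    · rintro ⟨⟨u, hu, v, hv, rfl, rfl⟩, hy⟩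
      exact ⟨hu, hy, hv⟩
    · rintro ⟨hx, hy, hadj⟩
      exact ⟨⟨x, hx, y, hadj, rfl, rfl⟩, hy⟩
  have hEL : ∀ a b : Int,
      pvRel ([] ++ (((g0 :: rest).flatMap (fun u => (pvAdj graph u).map (fun v => (u, v)))).filter
        (fun e => decide (e.2 ∈ g0 :: rest)))) a b ↔ pvEdge graph (g0 :: rest) a b := by
    intro a b
    unfold pvRel pvEdge
    rw [List.nil_append, hmemEL a b, hmemEL b a]
    constructor
    · rintro (⟨ha, hb, hab⟩ | ⟨hb, ha, hba⟩)
      · exact ⟨ha, hb, hab⟩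
      · exact ⟨ha, hb, (hsym b hb a ha).1 hba⟩
    · intro h
      exact Or.inl h
  have hreach : ∀ a b : Int,
      pvReach ([] ++ (((g0 :: rest).flatMap (fun u => (pvAdj graph u).map (fun v => (u, v)))).filter
        (fun e => decide (e.2 ∈ g0 :: rest)))) a b ↔
      Relation.ReflTransGen (pvEdge graph (g0 :: rest)) a b := fun a b =>
    ⟨Relation.ReflTransGen.mono (fun x y h => (hEL x y).1 h),
     Relation.ReflTransGen.mono (fun x y h => (hEL x y).2 h)⟩
  have hsymE : Symmetric (pvEdge graph (g0 :: rest)) := by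
    rintro x y ⟨hx, hy, hxy⟩
    exact ⟨hy, hx, (hsym x hx y hy).1 hxy⟩
  show ((g0 :: rest).all (fun v => PySem.Dict.getD ((g0 :: rest).foldl
        (fun c u => (pvAdj graph u).foldl (fun c v => pvUFStep (g0 :: rest) c u v) c)
        (PySem.Dict.mk ((g0 :: rest).map (fun v => (v, v))))) v 0 ==
      PySem.Dict.getD ((g0 :: rest).foldl
        (fun c u => (pvAdj graph u).foldl (fun c v => pvUFStep (g0 :: rest) c u v) c)
        (PySem.Dict.mk ((g0 :: rest).map (fun v => (v, v))))) g0 0)) = true ↔ _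
  rw [hfold, List.all_eq_true]
  constructor
  · intro h v hv
    have heq : PySem.Dict.getD (((g0 :: rest).flatMap
          (fun u => (pvAdj graph u).map (fun v => (u, v)))).foldl
          (fun c e => pvUFStep (g0 :: rest) c e.1 e.2)
          (PySem.Dict.mk ((g0 :: rest).map (fun v => (v, v))))) v 0 =
        PySem.Dict.getD (((g0 :: rest).flatMap
          (fun u => (pvAdj graph u).map (fun v => (u, v)))).foldl
          (fun c e => pvUFStep (g0 :: rest) c e.1 e.2)
          (PySem.Dict.mk ((g0 :: rest).map (fun v => (v, v))))) g0 0 := by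
      have := h v hv
      simpa using this
    exact Relation.ReflTransGen.symmetric hsymE
      ((hreach v g0).1 ((hmain v hv g0 hmem0).1 heq))
  · intro hP v hv
    have : pvReach ([] ++ (((g0 :: rest).flatMap
        (fun u => (pvAdj graph u).map (fun v => (u, v)))).filter
        (fun e => decide (e.2 ∈ g0 :: rest)))) v g0 :=
      (hreach v g0).2 (Relation.ReflTransGen.symmetric hsymE (hP v hv))
    simpa using (hmain v hv g0 hmem0).2 this

-- A's BFS neighbour scan, generalized over the scanned list
lemma pvBfsFold_spec (g : List Int) (l : List Int) (qs vis : List Int) :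
    ∃ new : List Int,
      l.foldl (fun p nb =>
        if !(p.2.contains nb) && g.contains nb then (p.1 ++ [nb], p.2 ++ [nb]) else p) (qs, vis)
        = (qs ++ new, vis ++ new) ∧
      (∀ x ∈ new, x ∈ l ∧ x ∈ g ∧ x ∉ vis) ∧ new.Nodup ∧
      (∀ v ∈ l, v ∈ g → v ∈ vis ++ new) := by
  induction l generalizing qs vis with
  | nil => exact ⟨[], by simp, by simp, List.nodup_nil, by simp⟩
  | cons nb l ih =>
    rw [List.foldl_cons]
    by_cases hc : (!(vis.contains nb) && g.contains nb) = true
    · have hnbg : nb ∈ g := by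
        rcases Bool.and_eq_true_iff.1 hc with ⟨_, h2⟩
        simpa [List.contains_eq_mem] using h2
      have hnbvis : nb ∉ vis := by
        rcases Bool.and_eq_true_iff.1 hc with ⟨h1, _⟩
        simpa [List.contains_eq_mem] using h1
      dsimp only
      rw [if_pos hc]
      obtain ⟨new, hfold, hprop, hnd, hcov⟩ := ih (qs ++ [nb]) (vis ++ [nb])
      refine ⟨nb :: new, ?_, ?_, ?_, ?_⟩
      · rw [hfold, List.append_assoc, List.append_assoc, List.singleton_append]
      · intro x hx
        rcases List.mem_cons.1 hx with rfl | hx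
        · exact ⟨List.mem_cons_self .., hnbg, hnbvis⟩
        · obtain ⟨hxl, hxg, hxv⟩ := hprop x hx
          exact ⟨List.mem_cons_of_mem _ hxl, hxg, fun hmem => hxv (List.mem_append_left _ hmem)⟩
      · refine List.nodup_cons.2 ⟨fun hmem => ?_, hnd⟩
        exact (hprop nb hmem).2.2 (List.mem_append_right _ (List.mem_singleton.2 rfl))
      · intro v hv hvg
        rcases List.mem_cons.1 hv with rfl | hv
        · exact List.mem_append_right _ (List.mem_cons_self ..)
        · have := hcov v hv hvg
          rwa [List.append_assoc, List.singleton_append] at this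
    · dsimp only
      rw [if_neg hc]
      obtain ⟨new, hfold, hprop, hnd, hcov⟩ := ih qs vis
      refine ⟨new, hfold, fun x hx => ?_, hnd, ?_⟩
      · obtain ⟨hxl, hxg, hxv⟩ := hprop x hx
        exact ⟨List.mem_cons_of_mem _ hxl, hxg, hxv⟩
      intro v hv hvg
      rcases List.mem_cons.1 hv with rfl | hv
      · have : v ∈ vis := by
          by_contra hvv
          exact hc (by simp [List.contains_eq_mem, hvv, hvg])
        exact List.mem_append_left _ this
      · exact hcov v hv hvg


-- A's BFS loop: visited stays sound and, once the queue empties, closed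
lemma pvBfs_spec (graph : List (Int × List Int)) (g : List Int) (g0 : Int)
    (fuel : Nat) (qs vis : List Int)
    (hnd : vis.Nodup) (hving : ∀ x ∈ vis, x ∈ g) (hqv : ∀ x ∈ qs, x ∈ vis)
    (hreach : ∀ x ∈ vis, Relation.ReflTransGen (pvEdge graph g) g0 x)
    (hclo : ∀ u ∈ vis, u ∉ qs → ∀ v ∈ pvAdj graph u, v ∈ g → v ∈ vis)
    (hcount : qs.length + g.length ≤ fuel + vis.length) :
    (∀ x ∈ vis, x ∈ pvBfs graph g fuel qs vis) ∧
    (∀ x ∈ pvBfs graph g fuel qs vis, x ∈ g) ∧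
    (∀ x ∈ pvBfs graph g fuel qs vis, Relation.ReflTransGen (pvEdge graph g) g0 x) ∧
    (∀ u ∈ pvBfs graph g fuel qs vis, ∀ v ∈ pvAdj graph u, v ∈ g →
      v ∈ pvBfs graph g fuel qs vis) := by
  induction fuel generalizing qs vis with
  | zero =>
    have hqnil : qs = [] := by
      have hle : vis.length ≤ g.length :=
        (List.subperm_of_subset hnd (fun x hx => hving x hx)).length_le
      have : qs.length = 0 := by omega
      exact List.eq_nil_of_length_eq_zero this
    subst hqnil
    simp only [pvBfs]
    exact ⟨fun x hx => hx, hving, hreach, fun u hu v hv hvg => hclo u hu (by simp) v hv hvg⟩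
  | succ fuel ih =>
    cases qs with
    | nil =>
      simp only [pvBfs]
      exact ⟨fun x hx => hx, hving, hreach, fun u hu v hv hvg => hclo u hu (by simp) v hv hvg⟩
    | cons node qs =>
      obtain ⟨new, hstep, hprop, hndnew, hcov⟩ := pvBfsFold_spec g (pvAdj graph node) qs vis
      have hbfs : pvBfs graph g (fuel + 1) (node :: qs) vis
          = pvBfs graph g fuel (qs ++ new) (vis ++ new) := by
        simp only [pvBfs]
        have : pvBfsStep graph g node qs vis = (qs ++ new, vis ++ new) := hstep
        rw [this]
      rw [hbfs]
      have hnodevis : node ∈ vis := hqv node (List.mem_cons_self ..)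
      have hdisj : vis.Disjoint new := fun a ha hanew => (hprop a hanew).2.2 ha
      have hres := ih (qs ++ new) (vis ++ new) (List.Nodup.append hnd hndnew hdisj) ?_ ?_ ?_ ?_ ?_
      · exact ⟨fun x hx => hres.1 x (List.mem_append_left _ hx), hres.2.1, hres.2.2.1, hres.2.2.2⟩
      · intro x hx
        rcases List.mem_append.1 hx with hx | hx
        · exact hving x hx
        · exact (hprop x hx).2.1
      · intro x hx
        rcases List.mem_append.1 hx with hx | hx
        · exact List.mem_append_left _ (hqv x (List.mem_cons_of_mem _ hx))
        · exact List.mem_append_right _ hx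
      · intro x hx
        rcases List.mem_append.1 hx with hx | hx
        · exact hreach x hx
        · exact (hreach node hnodevis).tail
            ⟨hving node hnodevis, (hprop x hx).2.1, (hprop x hx).1⟩
      · intro u hu huq v hv hvg
        rcases List.mem_append.1 hu with hu | hu
        · by_cases hun : u = node
          · subst hun
            exact hcov v hv hvg
          · have hclosed := hclo u hu (fun hm => by
              rcases List.mem_cons.1 hm with h | h
              · exact hun h
              · exact huq (List.mem_append_left _ h)) v hv hvg
            exact List.mem_append_left _ hclosed
        · exact absurd (List.mem_append_right qs hu) huq
      · simp only [List.length_append, List.length_cons] at hcount ⊢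
        omega


-- A's BFS test decides head-reachability
lemma pvIsConnected_iff (graph : List (Int × List Int)) (g0 : Int) (rest : List Int) :
    pvIsConnected (g0 :: rest) graph = true ↔
      ∀ v ∈ g0 :: rest, Relation.ReflTransGen (pvEdge graph (g0 :: rest)) g0 v := by
  have hmem0 : g0 ∈ g0 :: rest := List.mem_cons_self ..
  obtain ⟨hsub, hing, hreach, hclo⟩ := pvBfs_spec graph (g0 :: rest) g0 (g0 :: rest).length
    [g0] [g0]
    (by simp)
    (by intro x hx; rw [List.mem_singleton.1 hx]; exact hmem0)
    (fun x hx => hx)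
    (by intro x hx; rw [List.mem_singleton.1 hx])
    (by intro u hu huq; exact absurd hu huq)
    (by simp [Nat.add_comm])
  show ((g0 :: rest).all (fun v =>
      (pvBfs graph (g0 :: rest) (g0 :: rest).length [g0] [g0]).contains v) &&
    (pvBfs graph (g0 :: rest) (g0 :: rest).length [g0] [g0]).all (fun v =>
      (g0 :: rest).contains v)) = true ↔ _
  rw [Bool.and_eq_true, List.all_eq_true, List.all_eq_true]
  constructor
  · rintro ⟨h1, _⟩ v hv
    exact hreach v (by simpa [List.contains_eq_mem] using h1 v hv)
  · intro hP
    have hrtg : ∀ x, Relation.ReflTransGen (pvEdge graph (g0 :: rest)) g0 x →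
        x ∈ pvBfs graph (g0 :: rest) (g0 :: rest).length [g0] [g0] := by
      intro x hx
      induction hx with
      | refl => exact hsub g0 (List.mem_singleton.2 rfl)
      | tail hac hstep ih => exact hclo _ ih _ hstep.2.2 hstep.2.1
    constructor
    · intro v hv
      simpa [List.contains_eq_mem] using hrtg v (hP v hv)
    · intro v hv
      simpa [List.contains_eq_mem] using hing v hv

-- hence the two tests agree on every nodup group with symmetric adjacency
lemma pvUF_eq_bfs (graph : List (Int × List Int)) (g : List Int) (hg : g.Nodup)
    (hsym : ∀ u ∈ g, ∀ v ∈ g, (v ∈ pvAdj graph u ↔ u ∈ pvAdj graph v)) :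
    pvIsConnectedUF g graph = pvIsConnected g graph := by
  cases g with
  | nil => rfl
  | cons g0 rest =>
    rw [Bool.eq_iff_iff, pvIsConnectedUF_iff graph g0 rest hg hsym, pvIsConnected_iff graph g0 rest]

-- ----- the enumeration halves (A: combinations by size; B: powerset of {2..N}) -----

-- the min-accumulator both loops maintain ('inf' = none)
def pvOptMin (acc o : Option Int) : Option Int :=
  match o, acc with
  | none, acc => acc
  | some d, none => some d
  | some d, some m => some (min m d)

def pvPop (population : List Int) (g : List Int) : Int :=
  (g.map (fun v => PySem.List.pyGetD population (v - 1) 0)).sum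

def pvComp (N : Int) (g : List Int) : List Int :=
  (PySem.List.pyRange 1 (N + 1) 1).filter (fun v => !(g.contains v))

-- the value A's loop body contributes for a candidate group g
def pvF (N : Int) (population : List Int) (graph : List (Int × List Int)) (g : List Int) : Option Int :=
  if pvIsConnected g graph && pvIsConnected (pvComp N g) graph
  then some |pvPop population g - pvPop population (pvComp N g)| else none

-- the value B's loop body contributes for a subset s of {2..N}
def pvFB (N : Int) (population : List Int) (graph : List (Int × List Int)) (s : List Int) : Option Int :=
  if s.length = (N - 1).toNat then none
  else if pvIsConnectedUF (1 :: s) graph &&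
          pvIsConnectedUF ((PySem.List.pyRange 2 (N + 1) 1).filter (fun v => !(s.contains v))) graph
  then some |(PySem.List.slice population none (some N)).sum - 2 * pvPop population (1 :: s)| else none

lemma pvA_norm (N : Int) (pop : List Int) (graph : List (Int × List Int)) :
    solve_gerrymandering N pop graph =
      match ((PySem.List.pyRange 1 (PySem.Int.floordiv N 2 + 1) 1).flatMap
              (fun i => PySem.List.combinations (PySem.List.pyRange 1 (N + 1) 1) i.toNat)).foldl
              (fun acc g => pvOptMin acc (pvF N pop graph g)) none with
      | some d => d
      | none => -1 := by
  unfold solve_gerrymandering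
  dsimp only
  rw [← List.foldl_flatMap]
  have hb : (fun (acc : Option Int) (g1 : List Int) =>
      let g2 := (PySem.List.pyRange 1 (N + 1) 1).filter (fun v => !(g1.contains v))
      if pvIsConnected g1 graph && pvIsConnected g2 graph then
        let d := |(g1.map (fun v => PySem.List.pyGetD pop (v - 1) 0)).sum
                 - (g2.map (fun v => PySem.List.pyGetD pop (v - 1) 0)).sum|
        match acc with
        | none => some d
        | some m => some (min m d)
      else acc) = fun acc g => pvOptMin acc (pvF N pop graph g) := by
    funext acc g
    dsimp only
    by_cases hc : (pvIsConnected g graph &&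
        pvIsConnected ((PySem.List.pyRange 1 (N + 1) 1).filter (fun v => !(g.contains v))) graph) = true
    · rw [if_pos hc]
      unfold pvF pvComp pvPop
      rw [if_pos hc]
      cases acc <;> rfl
    · rw [if_neg hc]
      unfold pvF pvComp pvPop
      rw [if_neg hc]
      cases acc <;> rfl
  rw [hb]

lemma pvMinUpd_if (m d : Int) : (if d < m then some d else some m) = pvOptMin (some m) (some d) := by
  by_cases hdm : d < m
  · rw [if_pos hdm]
    show _ = some (min m d)
    rw [min_eq_right hdm.le]
  · rw [if_neg hdm]
    show _ = some (min m d)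
    rw [min_eq_left (by omega)]

lemma pvB_norm (N : Int) (pop : List Int) (graph : List (Int × List Int)) :
    solve_gerrymandering_alt N pop graph =
      if N < 2 then -1 else
      match ((PySem.List.pyRange 2 (N + 1) 1).foldl
              (fun acc v => acc ++ acc.map (fun s => s ++ [v])) [[]]).foldl
              (fun acc s => pvOptMin acc (pvFB N pop graph s)) none with
      | some d => d
      | none => -1 := by
  unfold solve_gerrymandering_alt
  dsimp only
  by_cases h2 : N < 2
  · rw [if_pos h2, if_pos h2]
  · rw [if_neg h2, if_neg h2]
    have hb : (fun (best : Option Int) (s : List Int) =>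
        if s.length = (N - 1).toNat then best
        else
          let g1 := 1 :: s
          let g2 := (PySem.List.pyRange 2 (N + 1) 1).filter (fun v => !(s.contains v))
          if pvIsConnectedUF g1 graph && pvIsConnectedUF g2 graph then
            let d := |(PySem.List.slice pop none (some N)).sum
                     - 2 * (g1.map (fun v => PySem.List.pyGetD pop (v - 1) 0)).sum|
            match best with
            | none => some d
            | some m => if d < m then some d else some m
          else best) = fun acc s => pvOptMin acc (pvFB N pop graph s) := by
      funext best s
      dsimp only
      by_cases hl : s.length = (N - 1).toNat
      · rw [if_pos hl]
        unfold pvFB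
        rw [if_pos hl]
        cases best <;> rfl
      · rw [if_neg hl]
        unfold pvFB pvPop
        rw [if_neg hl]
        by_cases hc : (pvIsConnectedUF (1 :: s) graph &&
            pvIsConnectedUF ((PySem.List.pyRange 2 (N + 1) 1).filter (fun v => !(s.contains v))) graph) = true
        · rw [if_pos hc, if_pos hc]
          cases best with
          | none => rfl
          | some m =>
            dsimp only
            exact pvMinUpd_if m _
        · rw [if_neg hc, if_neg hc]
          cases best <;> rfl
    rw [hb]
    cases List.foldl (fun acc s => pvOptMin acc (pvFB N pop graph s)) none
      (List.foldl (fun acc v => acc ++ List.map (fun s => s ++ [v]) acc) [[]]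
        (PySem.List.pyRange 2 (N + 1) 1)) <;> rfl

lemma pvFoldl_optMin_filterMap (l : List (Option Int)) (acc : Option Int) :
    l.foldl pvOptMin acc = (l.filterMap id).foldl (fun a d => pvOptMin a (some d)) acc := by
  induction l generalizing acc with
  | nil => rfl
  | cons o t ih => cases o <;> simp [ih, pvOptMin]

lemma pvFoldl_minUpd_some (t : List Int) (x : Int) :
    t.foldl (fun a d => pvOptMin a (some d)) (some x) = some (t.foldl min x) := by
  induction t generalizing x with
  | nil => rfl
  | cons y t ih =>
    rw [List.foldl_cons, List.foldl_cons]
    have h : pvOptMin (some x) (some y) = some (min x y) := rfl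
    rw [h, ih]

lemma pvFoldl_optMin_eq_min? (l : List (Option Int)) :
    l.foldl pvOptMin none = (l.filterMap id).min? := by
  rw [pvFoldl_optMin_filterMap]
  cases h : l.filterMap id with
  | nil => rfl
  | cons x t =>
    rw [List.foldl_cons]
    have h : pvOptMin none (some x) = some x := rfl
    rw [h, pvFoldl_minUpd_some]
    rfl

lemma pvFoldl_optMin_congr (l1 l2 : List (Option Int))
    (h : ∀ d : Int, some d ∈ l1 ↔ some d ∈ l2) :
    l1.foldl pvOptMin none = l2.foldl pvOptMin none := by
  rw [pvFoldl_optMin_eq_min?, pvFoldl_optMin_eq_min?]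
  have hm : ∀ d : Int, d ∈ l1.filterMap id ↔ d ∈ l2.filterMap id := by
    intro d; simp only [List.mem_filterMap, id]
    constructor
    · rintro ⟨o, ho, rfl⟩; exact ⟨some d, (h d).1 ho, rfl⟩
    · rintro ⟨o, ho, rfl⟩; exact ⟨some d, (h d).2 ho, rfl⟩
  cases h1 : (l1.filterMap id).min? with
  | none =>
    have he1 : l1.filterMap id = [] := List.min?_eq_none_iff.1 h1
    have he2 : l2.filterMap id = [] := by
      rw [List.eq_nil_iff_forall_not_mem]
      intro d hd
      have : d ∈ l1.filterMap id := (hm d).2 hd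
      rw [he1] at this
      simp at this
    rw [he2]
    rfl
  | some a =>
    have h1' := List.min?_eq_some_iff.1 h1
    exact (List.min?_eq_some_iff.2 ⟨(hm a).1 h1'.1, fun b hb => h1'.2 b ((hm b).2 hb)⟩).symm

-- membership in B's iteratively doubled powerset = being a sublist
lemma pvMem_powFold (l : List Int) (acc : List (List Int)) (s : List Int) :
    s ∈ l.foldl (fun a v => a ++ a.map (fun t => t ++ [v])) acc ↔
      ∃ t ∈ acc, ∃ u, u.Sublist l ∧ s = t ++ u := by
  induction l generalizing acc with
  | nil =>
    simp only [List.foldl_nil, List.sublist_nil]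
    constructor
    · intro hs; exact ⟨s, hs, [], rfl, by simp⟩
    · rintro ⟨t, ht, u, rfl, rfl⟩; simpa using ht
  | cons v l ih =>
    rw [List.foldl_cons, ih]
    constructor
    · rintro ⟨t, ht, u, hu, rfl⟩
      rcases List.mem_append.1 ht with ht | ht
      · exact ⟨t, ht, u, hu.trans (List.sublist_cons_self _ _), rfl⟩
      · rcases List.mem_map.1 ht with ⟨t0, ht0, rfl⟩
        exact ⟨t0, ht0, v :: u, List.sublist_cons_iff.2 (Or.inr ⟨u, rfl, hu⟩), by simp⟩
    · rintro ⟨t, ht, u, hu, rfl⟩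
      rcases List.sublist_cons_iff.1 hu with hu | ⟨u0, rfl, hu0⟩
      · exact ⟨t, List.mem_append.2 (Or.inl ht), u, hu, rfl⟩
      · exact ⟨t ++ [v], List.mem_append.2 (Or.inr (List.mem_map.2 ⟨t, ht, rfl⟩)),
          u0, hu0, by simp⟩

lemma pvMem_subsets (r : List Int) (s : List Int) :
    s ∈ r.foldl (fun a v => a ++ a.map (fun t => t ++ [v])) [[]] ↔ s.Sublist r := by
  rw [pvMem_powFold]
  constructor
  · rintro ⟨t, ht, u, hu, rfl⟩
    simp only [List.mem_singleton] at ht; subst ht; simpa using hu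
  · intro hs; exact ⟨[], by simp, s, hs, rfl⟩

-- filtering a nodup list down to a sublist gives the sublist back
lemma pvFilter_contains_of_sublist (s r : List Int) (hr : r.Nodup) (h : s.Sublist r) :
    r.filter (fun v => s.contains v) = s := by
  induction h with
  | slnil => rfl
  | @cons s l a h ih =>
    rcases List.nodup_cons.1 hr with ⟨ha, hl⟩
    have : s.contains a = false := by
      simp only [List.contains_eq_mem, decide_eq_false_iff_not]
      exact fun hmem => ha (h.subset hmem)
    simp only [List.filter_cons, this, Bool.false_eq_true, if_false]
    exact ih hl
  | @cons₂ s l a h ih =>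
    rcases List.nodup_cons.1 hr with ⟨ha, hl⟩
    have h1 : (a :: s).contains a = true := by simp [List.contains_eq_mem]
    have h2 : l.filter (fun v => (a :: s).contains v) = l.filter (fun v => s.contains v) := by
      apply List.filter_congr
      intro v hv
      have : v ≠ a := fun hva => ha (hva ▸ hv)
      simp [List.contains_eq_mem, this]
    simp only [List.filter_cons, h1, if_true, h2, ih hl]

lemma pvComp_eq_filter (N : Int) (g : List Int) (h2 : 2 ≤ N) :
    pvComp N g = (if g.contains 1 then [] else [1]) ++
      (PySem.List.pyRange 2 (N + 1) 1).filter (fun v => !(g.contains v)) := by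
  unfold pvComp
  rw [PySem.List.pyRange_one_cons (by omega : (1:Int) < N + 1)]
  cases h : g.contains 1
  · have h' : 1 ∉ g := by simpa [List.contains_eq_mem] using h
    simp [h']
  · have h' : 1 ∈ g := by simpa [List.contains_eq_mem] using h
    simp [h']

lemma pvComp_one_cons (N : Int) (s : List Int) (h2 : 2 ≤ N) :
    pvComp N (1 :: s) = (PySem.List.pyRange 2 (N + 1) 1).filter (fun v => !(s.contains v)) := by
  rw [pvComp_eq_filter N _ h2]
  have h1 : (1 :: s).contains 1 = true := by simp [List.contains_eq_mem]
  rw [h1]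
  apply List.filter_congr
  intro v hv
  have : v ≠ 1 := by
    rcases PySem.List.mem_pyRange_one.1 hv with ⟨hv2, _⟩; omega
  simp [List.contains_eq_mem, this]

lemma pvComp_comp (N : Int) (g : List Int) (hg : g.Sublist (PySem.List.pyRange 1 (N + 1) 1)) :
    pvComp N (pvComp N g) = g := by
  unfold pvComp
  have hnd := PySem.List.nodup_pyRange_one 1 (N + 1)
  have h1 : (PySem.List.pyRange 1 (N + 1) 1).filter
      (fun v => !((PySem.List.pyRange 1 (N + 1) 1).filter (fun w => !(g.contains w))).contains v) =
      (PySem.List.pyRange 1 (N + 1) 1).filter (fun v => g.contains v) := by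
    apply List.filter_congr
    intro v hv
    simp [List.contains_eq_mem, List.mem_filter, hv]
  rw [h1, pvFilter_contains_of_sublist g _ hnd hg]

-- the two parts of a partition sum to the whole
lemma pvPop_split (N : Int) (pop : List Int) (g : List Int)
    (hg : g.Sublist (PySem.List.pyRange 1 (N + 1) 1)) :
    pvPop pop (PySem.List.pyRange 1 (N + 1) 1) = pvPop pop g + pvPop pop (pvComp N g) := by
  have hperm := List.filter_append_perm (fun v => g.contains v) (PySem.List.pyRange 1 (N + 1) 1)
  have hsum : pvPop pop ((PySem.List.pyRange 1 (N + 1) 1).filter (fun v => g.contains v) ++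
      (PySem.List.pyRange 1 (N + 1) 1).filter (fun v => !(g.contains v))) =
      pvPop pop (PySem.List.pyRange 1 (N + 1) 1) := by
    unfold pvPop
    exact (hperm.map _).sum_eq
  rw [← hsum, pvFilter_contains_of_sublist g _ (PySem.List.nodup_pyRange_one 1 (N + 1)) hg]
  unfold pvPop pvComp
  simp [List.map_append]

lemma pvLength_comp (N : Int) (g : List Int) (h2 : 2 ≤ N)
    (hg : g.Sublist (PySem.List.pyRange 1 (N + 1) 1)) :
    g.length + (pvComp N g).length = N.toNat := by
  have hperm := List.filter_append_perm (fun v => g.contains v) (PySem.List.pyRange 1 (N + 1) 1)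
  have := hperm.length_eq
  rw [List.length_append, pvFilter_contains_of_sublist g _ (PySem.List.nodup_pyRange_one 1 (N + 1)) hg,
    PySem.List.length_pyRange_one] at this
  unfold pvComp
  omega

lemma pvTotal_eq (N : Int) (pop : List Int) (h2 : 2 ≤ N) (hlen : N ≤ (pop.length : Int)) :
    (PySem.List.slice pop none (some N)).sum = pvPop pop (PySem.List.pyRange 1 (N + 1) 1) := by
  rw [PySem.List.slice_to pop (by omega : (0:Int) ≤ N)]
  unfold pvPop
  have hmap : (PySem.List.pyRange 1 (N + 1) 1).map (fun v => PySem.List.pyGetD pop (v - 1) 0) =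
      pop.take N.toNat := by
    apply List.ext_getElem
    · simp [PySem.List.length_pyRange_one]
      omega
    · intro i h1 h2
      have hi : i < N.toNat := by
        simpa [PySem.List.length_pyRange_one] using h1
      have hilen : i < pop.length := by omega
      rw [List.getElem_map, PySem.List.getElem_pyRange_one, List.getElem_take]
      rw [show (1 : Int) + (i : Int) - 1 = ((i : Nat) : Int) by ring]
      rw [PySem.List.pyGetD_natCast]
      exact List.getD_eq_getElem pop 0 hilen
  rw [hmap]

-- pvF is invariant under taking the complement
lemma pvF_comp (N : Int) (pop : List Int) (graph : List (Int × List Int)) (g : List Int)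
    (hg : g.Sublist (PySem.List.pyRange 1 (N + 1) 1)) :
    pvF N pop graph (pvComp N g) = pvF N pop graph g := by
  unfold pvF
  rw [pvComp_comp N g hg, Bool.and_comm, abs_sub_comm]

-- B's contribution, rewritten through pvF (the union-find tests become A's BFS tests)
lemma pvFB_eq (N : Int) (pop : List Int) (graph : List (Int × List Int)) (s : List Int)
    (h2 : 2 ≤ N) (hlen : N ≤ (pop.length : Int))
    (hsym : ∀ u ∈ PySem.List.pyRange 1 (N + 1) 1, ∀ v ∈ PySem.List.pyRange 1 (N + 1) 1,
      (v ∈ pvAdj graph u ↔ u ∈ pvAdj graph v))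
    (hs : s.Sublist (PySem.List.pyRange 2 (N + 1) 1)) :
    pvFB N pop graph s = if s.length = (N - 1).toNat then none else pvF N pop graph (1 :: s) := by
  have hnodes : PySem.List.pyRange 1 (N + 1) 1 = 1 :: PySem.List.pyRange 2 (N + 1) 1 :=
    PySem.List.pyRange_one_cons (by omega)
  have hsub1 : (1 :: s).Sublist (PySem.List.pyRange 1 (N + 1) 1) := by
    rw [hnodes]; exact hs.cons₂ 1
  have hsub2 : ((PySem.List.pyRange 2 (N + 1) 1).filter (fun v => !(s.contains v))).Sublist
      (PySem.List.pyRange 1 (N + 1) 1) := by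
    rw [hnodes]
    exact List.filter_sublist.trans (List.sublist_cons_self _ _)
  have hndall := PySem.List.nodup_pyRange_one 1 (N + 1)
  have hsymOf : ∀ g : List Int, g.Sublist (PySem.List.pyRange 1 (N + 1) 1) →
      ∀ u ∈ g, ∀ v ∈ g, (v ∈ pvAdj graph u ↔ u ∈ pvAdj graph v) := by
    intro g hgsub u hu v hv
    exact hsym u (hgsub.subset hu) v (hgsub.subset hv)
  have hc1 : pvIsConnectedUF (1 :: s) graph = pvIsConnected (1 :: s) graph :=
    pvUF_eq_bfs graph _ (hsub1.nodup hndall) (hsymOf _ hsub1)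
  have hc2 : pvIsConnectedUF ((PySem.List.pyRange 2 (N + 1) 1).filter (fun v => !(s.contains v))) graph
      = pvIsConnected ((PySem.List.pyRange 2 (N + 1) 1).filter (fun v => !(s.contains v))) graph :=
    pvUF_eq_bfs graph _ (hsub2.nodup hndall) (hsymOf _ hsub2)
  unfold pvFB pvF
  by_cases hl : s.length = (N - 1).toNat
  · simp [hl]
  · rw [if_neg hl, if_neg hl, hc1, hc2, pvComp_one_cons N s h2]
    have hsplit := pvPop_split N pop (1 :: s) hsub1
    rw [pvComp_one_cons N s h2] at hsplit
    rw [pvTotal_eq N pop h2 hlen]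
    split
    · congr 1
      rw [hsplit]; ring_nf
      rw [abs_sub_comm]; ring_nf
    · rfl

-- the heart: A's candidate values and B's candidate values coincide
lemma pvMem_core (N : Int) (pop : List Int) (graph : List (Int × List Int))
    (h2 : 2 ≤ N) (hlen : N ≤ (pop.length : Int))
    (hsym : ∀ u ∈ PySem.List.pyRange 1 (N + 1) 1, ∀ v ∈ PySem.List.pyRange 1 (N + 1) 1,
      (v ∈ pvAdj graph u ↔ u ∈ pvAdj graph v))
    (d : Int) :
    (some d ∈ ((PySem.List.pyRange 1 (PySem.Int.floordiv N 2 + 1) 1).flatMap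
        (fun i => PySem.List.combinations (PySem.List.pyRange 1 (N + 1) 1) i.toNat)).map
        (pvF N pop graph)) ↔
    (some d ∈ ((PySem.List.pyRange 2 (N + 1) 1).foldl
        (fun a v => a ++ a.map (fun t => t ++ [v])) [[]]).map (pvFB N pop graph)) := by
  have hfd : PySem.Int.floordiv N 2 = N / 2 := PySem.Int.floordiv_eq_ediv_of_pos (by norm_num)
  have hnodes : PySem.List.pyRange 1 (N + 1) 1 = 1 :: PySem.List.pyRange 2 (N + 1) 1 :=
    PySem.List.pyRange_one_cons (by omega)
  have hrlen : (PySem.List.pyRange 2 (N + 1) 1).length = (N - 1).toNat := by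
    rw [PySem.List.length_pyRange_one]
    omega
  simp only [List.mem_map, List.mem_flatMap, PySem.List.mem_combinations_iff, pvMem_subsets]
  constructor
  · rintro ⟨g, ⟨i, hiI, hgsub, hglen⟩, hF⟩
    rw [hfd] at hiI
    rcases PySem.List.mem_pyRange_one.1 hiI with ⟨hi1, hi2⟩
    have hgl1 : 1 ≤ g.length := by omega
    have hgl2 : (g.length : Int) ≤ N / 2 := by omega
    by_cases h1g : 1 ∈ g
    · rw [hnodes] at hgsub
      rcases List.sublist_cons_iff.1 hgsub with hgr | ⟨t, rfl, htr⟩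
      · rcases PySem.List.mem_pyRange_one.1 (hgr.subset h1g) with ⟨hh, _⟩
        omega
      · refine ⟨t, htr, ?_⟩
        rw [pvFB_eq N pop graph t h2 hlen hsym htr]
        have htl : t.length ≠ (N - 1).toNat := by
          simp only [List.length_cons] at hglen
          omega
        rw [if_neg htl]
        exact hF
    · have hc1 : g.contains 1 = false := by
        simp [List.contains_eq_mem, h1g]
      have hcomp : pvComp N g =
          1 :: (PySem.List.pyRange 2 (N + 1) 1).filter (fun v => !(g.contains v)) := by
        rw [pvComp_eq_filter N g h2, hc1]
        rfl
      have hssub : ((PySem.List.pyRange 2 (N + 1) 1).filter (fun v => !(g.contains v))).Sublist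
          (PySem.List.pyRange 2 (N + 1) 1) := List.filter_sublist
      refine ⟨_, hssub, ?_⟩
      rw [pvFB_eq N pop graph _ h2 hlen hsym hssub]
      have hlc := pvLength_comp N g h2 hgsub
      rw [hcomp] at hlc
      simp only [List.length_cons] at hlc
      have hsl : ((PySem.List.pyRange 2 (N + 1) 1).filter (fun v => !(g.contains v))).length ≠
          (N - 1).toNat := by omega
      rw [if_neg hsl, ← hcomp, pvF_comp N pop graph g hgsub]
      exact hF
  · rintro ⟨s, hssub, hFB⟩
    rw [pvFB_eq N pop graph s h2 hlen hsym hssub] at hFB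
    by_cases hsl : s.length = (N - 1).toNat
    · rw [if_pos hsl] at hFB
      exact absurd hFB (by simp)
    rw [if_neg hsl] at hFB
    have hg1sub : (1 :: s).Sublist (PySem.List.pyRange 1 (N + 1) 1) := by
      rw [hnodes]
      exact hssub.cons₂ 1
    have hslen : s.length ≤ (N - 1).toNat := hrlen ▸ hssub.length_le
    by_cases hsmall : ((1 : Int) + s.length) ≤ N / 2
    · refine ⟨1 :: s, ⟨(1 + s.length : Int), ?_, hg1sub, ?_⟩, hFB⟩
      · rw [hfd, PySem.List.mem_pyRange_one]
        omega
      · simp only [List.length_cons]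
        omega
    · have hlc := pvLength_comp N (1 :: s) h2 hg1sub
      simp only [List.length_cons] at hlc
      have hcsub : (pvComp N (1 :: s)).Sublist (PySem.List.pyRange 1 (N + 1) 1) := by
        unfold pvComp
        exact List.filter_sublist
      refine ⟨pvComp N (1 :: s), ⟨((pvComp N (1 :: s)).length : Int), ?_, hcsub, ?_⟩, ?_⟩
      · rw [hfd, PySem.List.mem_pyRange_one]
        omega
      · omega
      · rw [pvF_comp N pop graph (1 :: s) hg1sub]
        exact hFB

-- ===== VERDICT (by name: the statement is the Claim_ definition above) =====
theorem solve_gerrymandering_spec : Claim_equal_solve_gerrymandering := by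
  intro N pop graph hdom hpre
  unfold Spec_solve_gerrymandering
  rw [pvA_norm, pvB_norm]
  by_cases h2 : N < 2
  · have hq : PySem.Int.floordiv N 2 + 1 ≤ 1 := by
      rw [PySem.Int.floordiv_eq_ediv_of_pos (by norm_num : (0:Int) < 2)]
      omega
    rw [PySem.List.pyRange_one_eq_nil hq]
    simp [h2]
  · rcases hpre with hpre | ⟨hlen, _, hsym⟩
    · omega
    rw [if_neg h2]
    have hfold :
        ((PySem.List.pyRange 1 (PySem.Int.floordiv N 2 + 1) 1).flatMap
          (fun i => PySem.List.combinations (PySem.List.pyRange 1 (N + 1) 1) i.toNat)).foldl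
          (fun acc g => pvOptMin acc (pvF N pop graph g)) none =
        ((PySem.List.pyRange 2 (N + 1) 1).foldl
          (fun a v => a ++ a.map (fun t => t ++ [v])) [[]]).foldl
          (fun acc s => pvOptMin acc (pvFB N pop graph s)) none := by
      rw [← List.foldl_map (f := pvF N pop graph) (g := pvOptMin),
        ← List.foldl_map (f := pvFB N pop graph) (g := pvOptMin)]
      exact pvFoldl_optMin_congr _ _ (pvMem_core N pop graph (by omega) hlen hsym)
    rw [hfold]
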